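-- pv_equiv track=rewrite | github.com/horta/cmeld | cmeld/__init__.py | strip_first_empty_lines
-- ===== SOURCE A (Python) =====
-- def strip_first_empty_lines(lines: list[str]) -> list[str]:
--     new_lines = []
--     state = 0
--     for line in lines:
--         if state == 0 and len(line.strip()) == 0:
--             continue
--         if state == 0 and len(line.strip()) > 0:
--             state += 1
--         new_lines.append(line)
--     return new_lines
-- ===== SOURCE B (Python) =====
-- def strip_first_empty_lines(lines: list[str]) -> list[str]:
--     # Stage 1: find the index of the first non-blank line (len(lines) if none).
--     i = next((k for k, line in enumerate(lines) if line.strip()), len(lines))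
--     # Stage 2: return the tail from that boundary in one slice.
--     return lines[i:]
-- ===== Notes on version B (the rewrite author's own statement) =====
-- stated objective: idiomatic
-- what changed: Replaced the single-pass state-machine accumulator loop with a two-stage decomposition: first compute the boundary index of the first non-blank line, then return the tail as one slice lines[i:] (no accumulator, no per-line appends).
import Mathlib
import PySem

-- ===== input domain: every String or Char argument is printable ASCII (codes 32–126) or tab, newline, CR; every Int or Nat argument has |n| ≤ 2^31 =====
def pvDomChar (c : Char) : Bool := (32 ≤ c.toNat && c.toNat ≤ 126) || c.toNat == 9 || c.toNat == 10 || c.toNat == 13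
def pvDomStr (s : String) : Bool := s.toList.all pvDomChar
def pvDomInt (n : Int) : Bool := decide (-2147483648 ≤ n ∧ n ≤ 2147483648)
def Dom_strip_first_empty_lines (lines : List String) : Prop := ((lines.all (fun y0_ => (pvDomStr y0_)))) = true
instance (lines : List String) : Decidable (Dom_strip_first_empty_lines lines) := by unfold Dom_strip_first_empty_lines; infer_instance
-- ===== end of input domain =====

-- B replaces A's state-machine accumulator loop by find-the-boundary-index then one slice; same return value, no side effects.

-- ===== PORT A =====
-- one loop step of A: state in .2, accumulated new_lines in .1
def pvStepA (acc : List String × Int) (line : String) : List String × Int :=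
  if acc.2 == 0 && PySem.Str.len (PySem.Str.strip line) == 0 then acc
  else if acc.2 == 0 && decide (0 < PySem.Str.len (PySem.Str.strip line)) then
    (acc.1 ++ [line], acc.2 + 1)
  else (acc.1 ++ [line], acc.2)

def strip_first_empty_lines (lines : List String) : List String :=
  (lines.foldl pvStepA ([], 0)).1

-- ===== PORT B =====
-- next((k for k, line in enumerate(lines) if line.strip()), len(lines)):
-- index of the first line whose strip() is truthy (non-empty), else len(lines)
def pvFirstKeep : List String → Nat
  | [] => 0
  | l :: ls => if PySem.Str.strip l == "" then pvFirstKeep ls + 1 else 0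

def strip_first_empty_lines_alt (lines : List String) : List String :=
  PySem.List.slice lines (some (pvFirstKeep lines : Int)) none   -- lines[i:], i = boundary index

-- ===== PRECONDITION & SPEC =====
def Spec_strip_first_empty_lines (lines : List String) (out : List String) : Prop := out = strip_first_empty_lines_alt lines
instance (lines : List String) (out : List String) : Decidable (Spec_strip_first_empty_lines lines out) := by unfold Spec_strip_first_empty_lines; infer_instance

-- ===== CLAIM =====
def Claim_equal_strip_first_empty_lines : Prop := ∀ (lines : List String), Dom_strip_first_empty_lines lines → Spec_strip_first_empty_lines lines (strip_first_empty_lines lines)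

-- ===== LEMMAS AND PROOFS =====

-- once state = 1, every remaining line is appended
lemma pvStepA_tail (lines : List String) (acc : List String) :
    (lines.foldl pvStepA (acc, 1)).1 = acc ++ lines := by
  induction lines generalizing acc with
  | nil => simp
  | cons l ls ih =>
    simp only [List.foldl_cons, pvStepA]
    norm_num
    rw [ih]
    simp

lemma pvStrip_eq (lines : List String) :
    strip_first_empty_lines lines = strip_first_empty_lines_alt lines := by
  induction lines with
  | nil => rfl
  | cons l ls ih =>
    unfold strip_first_empty_lines strip_first_empty_lines_alt at *
    rw [PySem.List.slice_from_natCast] at *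
    simp only [List.foldl_cons, pvFirstKeep]
    by_cases h : PySem.Str.strip l == ""
    · have h' : PySem.Chars.strip l.toList = [] := by
        have := PySem.Str.toList_strip l
        simpa [String.ext_iff, this] using h
      simp [pvStepA, h', ih, h]
    · have h' : PySem.Chars.strip l.toList ≠ [] := by
        intro hc
        apply h
        have := PySem.Str.toList_strip l
        simp [String.ext_iff, this, hc]
      have hpos : 0 < (PySem.Chars.strip l.toList).length := List.length_pos_iff.mpr h'
      simp [pvStepA, h', h]
      rw [if_pos hpos, pvStepA_tail]
      simp

-- ===== VERDICT =====
theorem strip_first_empty_lines_spec : Claim_equal_strip_first_empty_lines := by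
  intro lines _
  exact pvStrip_eq lines
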